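-- pv_equiv track=rewrite | github.com/akohen/AdventOfCode | aoc_2015/src/day5.py | phase2
-- ===== SOURCE A (Python) =====
-- def phase2(string:str):
--     pair, repeat, i = False, False, 0
--     for i in range(0,len(string)-2):
--         if string[i+2] == string[i]:
--             repeat = True
--         for k in range(i+2,len(string)):
--             if string[i:i+2] == string[k:k+2]:
--                 pair = True
--     return pair & repeat
-- ===== SOURCE B (Python) =====
-- def phase2(string: str):
--     first = {}
--     pair = False
--     idx = 0
--     for a, b in zip(string, string[1:]):
--         p = (a, b)
--         if p in first:
--             if idx >= first[p] + 2:
--                 pair = True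
--         else:
--             first[p] = idx
--         idx += 1
--     repeat = any(a == c for a, c in zip(string, string[2:]))
--     return pair and repeat
-- ===== Notes on version B (the rewrite author's own statement) =====
-- stated objective: faster
-- what changed: Replaced the quadratic nested rescan (for each position, rescan the rest of the string for the same two-char slice) by a single left-to-right pass over adjacent character pairs keeping a dict pair->index of first occurrence and flagging when the same pair reappears two or more positions later; the repeat-with-gap test becomes one zip of the string against itself shifted by two.
import Mathlib
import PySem

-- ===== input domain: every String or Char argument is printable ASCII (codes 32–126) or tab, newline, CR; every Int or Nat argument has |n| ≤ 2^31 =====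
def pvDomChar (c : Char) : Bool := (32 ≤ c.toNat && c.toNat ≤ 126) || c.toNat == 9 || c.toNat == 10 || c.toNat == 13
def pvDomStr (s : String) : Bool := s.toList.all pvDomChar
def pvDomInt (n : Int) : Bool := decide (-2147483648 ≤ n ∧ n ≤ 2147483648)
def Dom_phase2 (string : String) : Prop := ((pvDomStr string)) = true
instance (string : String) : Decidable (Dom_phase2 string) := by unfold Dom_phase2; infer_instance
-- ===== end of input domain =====

-- B replaces A's quadratic nested pair-rescan by one left-to-right pass over adjacent pairs with a dict of first occurrences (objective: faster).


-- ===== PORT A =====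
def phase2 (string : String) : Bool :=
  let n : Int := (PySem.Str.len string : Int)
  let st := (PySem.List.pyRange 0 (n - 2)).foldl
    (fun (st : Bool × Bool) i =>
      let rep := if PySem.Str.pyGet? string (i + 2) == PySem.Str.pyGet? string i then true else st.2
      let pr := (PySem.List.pyRange (i + 2) n).foldl
        (fun p k =>
          if PySem.Str.slice string (some i) (some (i + 2)) == PySem.Str.slice string (some k) (some (k + 2))
          then true else p) st.1
      (pr, rep))
    (false, false)
  st.1 && st.2

-- ===== PORT B =====
-- one pass over zip(string, string[1:]) keeping a dict pair -> index of its first occurrence,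
-- flagging a reappearance two or more positions later; the repeat-with-gap test is a zip of
-- the string against itself shifted by two
def phase2_alt (string : String) : Bool :=
  let cs := string.toList
  let st := (cs.zip cs.tail).foldl
    (fun (st : Int × PySem.Dict (Char × Char) Int × Bool) p =>
      match st.2.1.get? p with
      | some f => (st.1 + 1, st.2.1, if st.1 ≥ f + 2 then true else st.2.2)
      | none => (st.1 + 1, st.2.1.insert p st.1, st.2.2))
    (0, PySem.Dict.empty, false)
  let rep := (cs.zip (cs.drop 2)).any (fun q => q.1 == q.2)
  st.2.2 && rep

-- ===== PRECONDITION & SPEC =====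
def Spec_phase2 (string : String) (out : Bool) : Prop := out = phase2_alt string
instance (string : String) (out : Bool) : Decidable (Spec_phase2 string out) := by unfold Spec_phase2; infer_instance

-- ===== CLAIM (what is proved, stated in full; the proofs are below) =====
def Claim_equal_phase2 : Prop := ∀ (string : String), Dom_phase2 string → Spec_phase2 string (phase2 string)

-- ===== LEMMAS AND PROOFS =====

-- the loop bodies of the two ports, named so that rewriting can see through beta-reduction
def pvABody (s : String) (nn : Int) : Bool × Bool → Int → Bool × Bool :=
  fun st i =>
    let rep := if PySem.Str.pyGet? s (i + 2) == PySem.Str.pyGet? s i then true else st.2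
    let pr := (PySem.List.pyRange (i + 2) nn).foldl
      (fun p k =>
        if PySem.Str.slice s (some i) (some (i + 2)) == PySem.Str.slice s (some k) (some (k + 2))
        then true else p) st.1
    (pr, rep)

def pvBBody : (Int × PySem.Dict (Char × Char) Int × Bool) → (Char × Char) →
    (Int × PySem.Dict (Char × Char) Int × Bool) :=
  fun st p =>
    match st.2.1.get? p with
    | some f => (st.1 + 1, st.2.1, if st.1 ≥ f + 2 then true else st.2.2)
    | none => (st.1 + 1, st.2.1.insert p st.1, st.2.2)

-- a fold that only ever sets its Boolean accumulator is List.any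
theorem pvOrFold {α : Type} (p : α → Bool) (L : List α) (b : Bool) :
    L.foldl (fun acc k => if p k then true else acc) b = (b || L.any p) := by
  induction L generalizing b with
  | nil => simp
  | cons x xs ih =>
      rw [List.foldl_cons, ih]
      cases h : p x <;> simp [h]

-- A's outer loop: both components are or-accumulations
theorem pvAFold (s : String) (nn : Int) (L : List Int) (a b : Bool) :
    L.foldl (pvABody s nn) (a, b)
    = (a || L.any (fun i => (PySem.List.pyRange (i + 2) nn).any
          (fun k => PySem.Str.slice s (some i) (some (i + 2)) == PySem.Str.slice s (some k) (some (k + 2)))),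
       b || L.any (fun i => PySem.Str.pyGet? s (i + 2) == PySem.Str.pyGet? s i)) := by
  induction L generalizing a b with
  | nil => simp
  | cons x xs ih =>
      rw [List.foldl_cons]
      refine Eq.trans (ih _ _) ?_
      simp only [pvOrFold, List.any_cons]
      cases hx : (PySem.Str.pyGet? s (x + 2) == PySem.Str.pyGet? s x) <;>
        simp [Bool.or_assoc]

-- index of the first occurrence of a pair
def pvFirst (l : List (Char × Char)) (p : Char × Char) : Option Nat :=
  l.findIdx? (fun q => q == p)

-- B's scan invariant: with the dict holding the first occurrence of every pair of pre,
-- the flag turns true iff some element of ps equals an element at least two positions earlier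
theorem pvBFold (ps : List (Char × Char)) : ∀ (pre : List (Char × Char))
    (d : PySem.Dict (Char × Char) Int) (b : Bool),
    (∀ p, d.get? p = (pvFirst pre p).map (fun j => (j : Int))) →
    (((ps.foldl pvBBody ((pre.length : Int), d, b)).2.2 = true) ↔
      (b = true ∨ ∃ j m : Nat, j + 2 ≤ m ∧ pre.length ≤ m ∧ m < (pre ++ ps).length ∧
        (pre ++ ps)[j]? = (pre ++ ps)[m]?)) := by
  induction ps with
  | nil =>
      intro pre d b _
      simp only [List.foldl_nil, List.append_nil]
      constructor
      · exact Or.inl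
      · rintro (h | ⟨j, m, h1, h2, h3, h4⟩)
        · exact h
        · omega
  | cons p0 ps ih =>
      intro pre d b hinv
      have hlen : ((pre.length : Int) + 1) = (((pre ++ [p0]).length : Nat) : Int) := by
        simp
      have happ : pre ++ p0 :: ps = (pre ++ [p0]) ++ ps := by simp
      have hL : (pre ++ p0 :: ps)[pre.length]? = some p0 := by
        rw [List.getElem?_append_right (le_refl _)]
        simp
      rw [List.foldl_cons]
      cases hget : d.get? p0 with
      | some f =>
          -- p0 occurred before: the dict is unchanged and the flag may fire
          obtain ⟨j0, hj0⟩ : ∃ j0, pvFirst pre p0 = some j0 := by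
            cases hoc : pvFirst pre p0 with
            | none => rw [hinv p0, hoc] at hget; simp at hget
            | some j0 => exact ⟨j0, rfl⟩
          have hfj0 : f = (j0 : Int) := by
            have h := hinv p0; rw [hj0, hget] at h; simpa using h
          have hj0' := hj0
          unfold pvFirst at hj0'
          rw [List.findIdx?_eq_some_iff_getElem] at hj0'
          obtain ⟨hj0lt, hj0eq, hj0min⟩ := hj0'
          have hj0eq' : pre[j0] = p0 := by simpa using hj0eq
          have hinv' : ∀ p, (d.get? p) = (pvFirst (pre ++ [p0]) p).map (fun j => (j : Int)) := by
            intro p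
            rw [hinv p]
            unfold pvFirst
            rw [List.findIdx?_append]
            cases hoc : List.findIdx? (fun q => q == p) pre with
            | some j => simp
            | none =>
                by_cases hpp : p = p0
                · exfalso; rw [hpp] at hoc; rw [pvFirst, hoc] at hj0; simp at hj0
                · simp [List.findIdx?_cons, Ne.symm hpp]
          have hred : pvBBody ((pre.length : Int), d, b) p0
              = ((pre.length : Int) + 1, d, if (pre.length : Int) ≥ f + 2 then true else b) := by
            simp only [pvBBody, hget]
          rw [hred, hlen, ih (pre ++ [p0]) d _ hinv']
          rw [← happ]
          simp only [List.length_append, List.length_cons, List.length_nil]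
          by_cases hcond : (pre.length : Int) ≥ f + 2
          · rw [if_pos hcond]
            simp only [true_or, true_iff]
            right
            have hj02 : j0 + 2 ≤ pre.length := by
              rw [hfj0] at hcond; exact_mod_cast hcond
            refine ⟨j0, pre.length, by omega, le_refl _, by omega, ?_⟩
            rw [hL, List.getElem?_append_left hj0lt, List.getElem?_eq_getElem hj0lt, hj0eq']
          · rw [if_neg hcond]
            constructor
            · rintro (hb | ⟨j, m, h1, h2, h3, h4⟩)
              · exact Or.inl hb
              · exact Or.inr ⟨j, m, h1, by omega, h3, h4⟩
            · rintro (hb | ⟨j, m, h1, h2, h3, h4⟩)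
              · exact Or.inl hb
              · by_cases hm : pre.length + 1 ≤ m
                · exact Or.inr ⟨j, m, h1, hm, h3, h4⟩
                · exfalso
                  have hmeq : m = pre.length := by omega
                  rw [hmeq, hL] at h4
                  have hjlt : j < pre.length := by omega
                  rw [List.getElem?_append_left hjlt, List.getElem?_eq_getElem hjlt] at h4
                  have hjp : pre[j] = p0 := by simpa using h4
                  have hj0j : j0 ≤ j := by
                    by_contra hlt
                    exact (hj0min j (by omega)) (by simp [hjp])
                  apply hcond
                  rw [hfj0]
                  have : j0 + 2 ≤ pre.length := by omega
                  exact_mod_cast this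
      | none =>
          -- first occurrence of p0: insert it, the flag cannot fire
          have hnone : pvFirst pre p0 = none := by
            cases hoc : pvFirst pre p0 with
            | none => rfl
            | some j0 => rw [hinv p0, hoc] at hget; simp at hget
          have hnooc : ∀ j (hj : j < pre.length), pre[j] ≠ p0 := by
            intro j hj hjp
            have := List.findIdx?_eq_none_iff.mp hnone pre[j] (List.getElem_mem hj)
            simp [hjp] at this
          have hinv' : ∀ p, ((d.insert p0 (pre.length : Int)).get? p)
              = (pvFirst (pre ++ [p0]) p).map (fun j => (j : Int)) := by
            intro p
            by_cases hpp : p = p0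
            · subst hpp
              rw [PySem.Dict.get?_insert_self]
              unfold pvFirst
              rw [List.findIdx?_append]
              unfold pvFirst at hnone
              simp [hnone, List.findIdx?_cons]
            · rw [PySem.Dict.get?_insert_of_ne d _ hpp, hinv p]
              unfold pvFirst
              rw [List.findIdx?_append]
              cases hoc : List.findIdx? (fun q => q == p) pre with
              | some j => simp
              | none => simp [List.findIdx?_cons, Ne.symm hpp]
          have hred : pvBBody ((pre.length : Int), d, b) p0
              = ((pre.length : Int) + 1, d.insert p0 (pre.length : Int), b) := by
            simp only [pvBBody, hget]
          rw [hred, hlen, ih (pre ++ [p0]) _ _ hinv']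
          rw [← happ]
          simp only [List.length_append, List.length_cons, List.length_nil]
          constructor
          · rintro (hb | ⟨j, m, h1, h2, h3, h4⟩)
            · exact Or.inl hb
            · exact Or.inr ⟨j, m, h1, by omega, h3, h4⟩
          · rintro (hb | ⟨j, m, h1, h2, h3, h4⟩)
            · exact Or.inl hb
            · by_cases hm : pre.length + 1 ≤ m
              · exact Or.inr ⟨j, m, h1, hm, h3, h4⟩
              · exfalso
                have hmeq : m = pre.length := by omega
                rw [hmeq, hL] at h4
                have hjlt : j < pre.length := by omega
                rw [List.getElem?_append_left hjlt, List.getElem?_eq_getElem hjlt] at h4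
                exact hnooc j hjlt (by simpa using h4)

theorem pvStrGet (s : String) (i : Int) : PySem.Str.pyGet? s i = PySem.List.pyGet? s.toList i := by
  simp [PySem.Str.pyGet?]

-- two-character window of cs at j
theorem pvWin (cs : List Char) (j : Nat) (h : j + 1 < cs.length) :
    (cs.drop j).take 2 = [cs[j], cs[j + 1]] := by
  rw [List.drop_eq_getElem_cons (by omega), List.drop_eq_getElem_cons h]
  rfl

theorem pvSliceWin (s : String) (j : Nat) :
    (PySem.Str.slice s (some (j : Int)) (some ((j : Int) + 2))).toList = (s.toList.drop j).take 2 := by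
  have h2 : ((j : Int) + 2) = (((j + 2 : Nat) : Nat) : Int) := by push_cast; ring
  rw [PySem.Str.toList_slice, PySem.Chars.slice_eq_listSlice, h2, PySem.List.slice_natCast]
  congr 1
  omega

-- A's repeat loop, characterised
theorem pvRepA_iff (s : String) :
    ((PySem.List.pyRange 0 ((PySem.Str.len s : Int) - 2) 1).any
        (fun i => PySem.Str.pyGet? s (i + 2) == PySem.Str.pyGet? s i) = true)
    ↔ ∃ i : Nat, i + 2 < s.toList.length ∧ s.toList[i + 2]? = s.toList[i]? := by
  simp only [List.any_eq_true, PySem.List.mem_pyRange_one, pvStrGet, PySem.Str.len_eq]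
  constructor
  · rintro ⟨i, ⟨hi0, hi2⟩, heq⟩
    obtain ⟨j, rfl⟩ : ∃ j : Nat, i = (j : Int) := ⟨i.toNat, (Int.toNat_of_nonneg hi0).symm⟩
    have hc : ((j : Int) + 2) = ((j + 2 : Nat) : Int) := by push_cast; ring
    rw [hc, PySem.List.pyGet?_natCast, PySem.List.pyGet?_natCast] at heq
    exact ⟨j, by omega, beq_iff_eq.mp heq⟩
  · rintro ⟨j, hj, heq⟩
    refine ⟨(j : Int), ⟨by positivity, by omega⟩, ?_⟩
    have hc : ((j : Int) + 2) = ((j + 2 : Nat) : Int) := by push_cast; ring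
    rw [hc, PySem.List.pyGet?_natCast, PySem.List.pyGet?_natCast]
    exact beq_iff_eq.mpr heq

-- B's repeat test, characterised
theorem pvRepB_iff (cs : List Char) :
    ((cs.zip (cs.drop 2)).any (fun q => q.1 == q.2) = true)
    ↔ ∃ i : Nat, i + 2 < cs.length ∧ cs[i + 2]? = cs[i]? := by
  rw [List.any_eq_true]
  constructor
  · rintro ⟨q, hq, hbeq⟩
    obtain ⟨i, hi, rfl⟩ := List.mem_iff_getElem.mp hq
    have hi' : i + 2 < cs.length := by
      have := hi; simp only [List.length_zip, List.length_drop] at this; omega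
    refine ⟨i, hi', ?_⟩
    rw [List.getElem_zip] at hbeq
    simp only at hbeq
    rw [List.getElem?_eq_getElem hi', List.getElem?_eq_getElem (by omega)]
    have h2 : cs[i] = (cs.drop 2)[i]'(by simp only [List.length_drop]; omega) := beq_iff_eq.mp hbeq
    rw [List.getElem_drop] at h2
    simp only [Option.some.injEq]
    have hidx : i + 2 = 2 + i := by omega
    simp only [hidx]
    exact h2.symm
  · rintro ⟨i, hi, heq⟩
    have hzl : i < (cs.zip (cs.drop 2)).length := by
      simp only [List.length_zip, List.length_drop]; omega
    refine ⟨(cs.zip (cs.drop 2))[i], List.getElem_mem hzl, ?_⟩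
    rw [List.getElem_zip]
    rw [List.getElem?_eq_getElem hi, List.getElem?_eq_getElem (by omega : i < cs.length)] at heq
    have h' : cs[i + 2] = cs[i] := by simpa using heq
    apply beq_iff_eq.mpr
    simp only
    rw [List.getElem_drop]
    have hidx : 2 + i = i + 2 := by omega
    simp only [hidx]
    exact h'.symm

theorem pvPget (cs : List Char) (j : Nat) (h : j + 1 < cs.length) :
    (cs.zip cs.tail)[j]? = some (cs[j], cs[j + 1]) := by
  have hz : j < (cs.zip cs.tail).length := by
    simp only [List.length_zip, List.length_tail]; omega
  rw [List.getElem?_eq_getElem hz, List.getElem_zip, List.getElem_tail]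

-- A's nested pair loops, characterised over the list of adjacent pairs
theorem pvPairA_iff (s : String) :
    ((PySem.List.pyRange 0 ((PySem.Str.len s : Int) - 2) 1).any
        (fun i => (PySem.List.pyRange (i + 2) (PySem.Str.len s : Int) 1).any
          (fun k => PySem.Str.slice s (some i) (some (i + 2)) == PySem.Str.slice s (some k) (some (k + 2)))) = true)
    ↔ ∃ j m : Nat, j + 2 ≤ m ∧ m < (s.toList.zip s.toList.tail).length ∧
        (s.toList.zip s.toList.tail)[j]? = (s.toList.zip s.toList.tail)[m]? := by
  simp only [List.any_eq_true, PySem.List.mem_pyRange_one, PySem.Str.len_eq]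
  constructor
  · rintro ⟨i, ⟨hi0, hi2⟩, k, ⟨hk1, hk2⟩, heq⟩
    obtain ⟨j, rfl⟩ : ∃ j : Nat, i = (j : Int) := ⟨i.toNat, (Int.toNat_of_nonneg hi0).symm⟩
    obtain ⟨m, rfl⟩ : ∃ m : Nat, k = (m : Int) := ⟨k.toNat, (Int.toNat_of_nonneg (by omega)).symm⟩
    have hj2 : j + 2 < s.toList.length := by omega
    have hjm : j + 2 ≤ m := by omega
    have hmn : m < s.toList.length := by omega
    have heq' : (s.toList.drop j).take 2 = (s.toList.drop m).take 2 := by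
      rw [← pvSliceWin, ← pvSliceWin]
      exact congrArg String.toList (beq_iff_eq.mp heq)
    have hm2 : m + 2 ≤ s.toList.length := by
      have hl := congrArg List.length heq'
      simp only [List.length_take, List.length_drop] at hl
      omega
    rw [pvWin _ j (by omega), pvWin _ m (by omega)] at heq'
    have e1 : s.toList[j] = s.toList[m] := by simpa using congrArg (fun l => l.headI) heq'
    have e2 : s.toList[j + 1] = s.toList[m + 1] := by
      simpa using congrArg (fun l => l.tail.headI) heq'
    refine ⟨j, m, hjm, ?_, ?_⟩
    · simp only [List.length_zip, List.length_tail]; omega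
    · rw [pvPget _ j (by omega), pvPget _ m (by omega), e1, e2]
      rfl
  · rintro ⟨j, m, hjm, hm, heq⟩
    have hmn : m + 1 < s.toList.length := by
      simp only [List.length_zip, List.length_tail] at hm; omega
    rw [pvPget _ j (by omega), pvPget _ m (by omega)] at heq
    have e1 : s.toList[j] = s.toList[m] := by
      have := Option.some.inj heq; exact congrArg Prod.fst this
    have e2 : s.toList[j + 1] = s.toList[m + 1] := by
      have := Option.some.inj heq; exact congrArg Prod.snd this
    refine ⟨(j : Int), ⟨by positivity, by omega⟩, (m : Int), ⟨by omega, by omega⟩, ?_⟩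
    apply beq_iff_eq.mpr
    apply String.toList_inj.mp
    rw [pvSliceWin, pvSliceWin, pvWin _ j (by omega), pvWin _ m (by omega), e1, e2]

-- B's pair scan from the empty dict, characterised
theorem pvPairB_iff (cs : List Char) :
    (((cs.zip cs.tail).foldl pvBBody (0, PySem.Dict.empty, false)).2.2 = true) ↔
      ∃ j m : Nat, j + 2 ≤ m ∧ m < (cs.zip cs.tail).length ∧
        (cs.zip cs.tail)[j]? = (cs.zip cs.tail)[m]? := by
  have h := pvBFold (cs.zip cs.tail) [] PySem.Dict.empty false
      (by intro p; simp [pvFirst, PySem.Dict.get?_empty])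
  simp only [List.length_nil, Nat.cast_zero, List.nil_append] at h
  rw [h]
  simp only [Bool.false_eq_true, false_or, Nat.zero_le, true_and]

-- ===== VERDICT (by name: the statement is the Claim_ definition above) =====
theorem phase2_spec : Claim_equal_phase2 := by
  intro string _
  unfold Spec_phase2
  have hA : phase2 string =
      (((PySem.List.pyRange 0 ((PySem.Str.len string : Int) - 2)).foldl
          (pvABody string (PySem.Str.len string : Int)) (false, false)).1 &&
       ((PySem.List.pyRange 0 ((PySem.Str.len string : Int) - 2)).foldl
          (pvABody string (PySem.Str.len string : Int)) (false, false)).2) := rfl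
  have hB : phase2_alt string =
      (((string.toList.zip string.toList.tail).foldl pvBBody (0, PySem.Dict.empty, false)).2.2 &&
       (string.toList.zip (string.toList.drop 2)).any (fun q => q.1 == q.2)) := rfl
  rw [hA, hB, pvAFold]
  simp only [Bool.false_or]
  congr 1
  · rw [Bool.eq_iff_iff, pvPairA_iff, pvPairB_iff]
  · rw [Bool.eq_iff_iff, pvRepA_iff, pvRepB_iff]
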